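-- pv_equiv track=rewrite | github.com/wnstjd9701/BAEKJOON | 프로그래머스/2단계/위장.py | solution
-- ===== SOURCE A (Python) =====
-- def solution(clothes):
--     answer = 1
--     dic = {}
--     for v, k in clothes:
--         if not k in dic: # 처음일 경우 딕셔너리 초기화
--             dic[k] = 0
--         dic[k] += 1
--
--     for v in dic.values():
--         answer *= v + 1
--
--     return answer - 1
-- ===== SOURCE B (Python) =====
-- def solution(clothes):
--     # sort-then-group: count consecutive runs of equal categories in sorted order
--     cats = sorted(k for _, k in clothes)
--     prod = 1
--     while cats:
--         c, rest = cats[0], cats[1:]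
--         run = 1
--         while rest and rest[0] == c:
--             run += 1
--             rest = rest[1:]
--         prod *= run + 1
--         cats = rest
--     return prod - 1
-- ===== Notes on version B (the rewrite author's own statement) =====
-- stated objective: alternative
-- what changed: Replaces the hash-counting dictionary and its values pass with a sort of the category list followed by a single run-length scan multiplying (run+1) per consecutive group.
import Mathlib
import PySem

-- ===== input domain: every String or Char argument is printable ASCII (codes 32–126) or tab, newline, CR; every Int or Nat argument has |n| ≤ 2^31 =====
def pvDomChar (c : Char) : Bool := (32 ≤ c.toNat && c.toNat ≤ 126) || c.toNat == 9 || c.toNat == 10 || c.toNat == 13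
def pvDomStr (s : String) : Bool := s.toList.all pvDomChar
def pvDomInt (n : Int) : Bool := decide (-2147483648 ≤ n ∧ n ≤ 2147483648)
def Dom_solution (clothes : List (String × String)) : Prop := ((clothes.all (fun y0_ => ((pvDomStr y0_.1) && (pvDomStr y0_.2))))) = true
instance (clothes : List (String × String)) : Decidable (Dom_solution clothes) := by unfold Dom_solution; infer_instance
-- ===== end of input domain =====

-- B replaces A's hash-counting dictionary with a sort-then-group run-length scan (alternative decomposition, not faster).

-- ===== PORT A =====
-- loop body: 'if not k in dic: dic[k] = 0' then 'dic[k] += 1'  (k = p.2)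
def stepA (d : PySem.Dict String Int) (p : String × String) : PySem.Dict String Int :=
  let d := if d.contains p.2 then d else d.insert p.2 (0 : Int)
  d.insert p.2 (d.getD p.2 0 + 1)

def solution (clothes : List (String × String)) : Int :=
  let dic := clothes.foldl stepA PySem.Dict.empty
  (dic.values.foldl (fun answer v => answer * (v + 1)) 1) - 1

-- ===== PORT B =====
-- inner while: 'while rest and rest[0] == c: run += 1; rest = rest[1:]' — run increments over rest, remainder returned
def spanRun (c : String) : List String → Nat × List String
  | [] => (0, [])
  | x :: xs => if x == c then
      let p := spanRun c xs
      (p.1 + 1, p.2)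
    else (0, x :: xs)

theorem spanRun_length_le (c : String) (l : List String) : (spanRun c l).2.length ≤ l.length := by
  induction l with
  | nil => simp [spanRun]
  | cons x xs ih =>
    simp only [spanRun]
    split
    · exact Nat.le_succ_of_le ih
    · simp

-- outer while: one factor (run + 1) per group of equal consecutive categories
def groupsProd : List String → Int
  | [] => 1
  | c :: rest =>
      let p := spanRun c rest
      ((p.1 : Int) + 2) * groupsProd p.2
termination_by s => s.length
decreasing_by
  exact Nat.lt_succ_of_le (spanRun_length_le c rest)

def solution_alt (clothes : List (String × String)) : Int :=
  groupsProd (PySem.List.sorted (clothes.map (fun p => p.2)) (fun x => x) false) - 1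

-- ===== PRECONDITION & SPEC =====
def Spec_solution (clothes : List (String × String)) (out : Int) : Prop := out = solution_alt clothes
instance (clothes : List (String × String)) (out : Int) : Decidable (Spec_solution clothes out) := by unfold Spec_solution; infer_instance

-- ===== CLAIM (what is proved, stated in full; the proofs are below) =====
def Claim_equal_solution : Prop := ∀ (clothes : List (String × String)), Dom_solution clothes → Spec_solution clothes (solution clothes)

-- ===== LEMMAS AND PROOFS =====

-- A's loop body is the counter step
theorem stepA_eq (d : PySem.Dict String Int) (p : String × String) :
    stepA d p = d.insert p.2 (d.getD p.2 0 + 1) := by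
  unfold stepA
  by_cases h : d.contains p.2 = true
  · simp [h]
  · have h' : d.contains p.2 = false := by simpa using h
    simp only [h', Bool.false_eq_true, if_false]
    rw [PySem.Dict.getD_insert_self, PySem.Dict.insert_insert_self,
        PySem.Dict.getD_of_not_contains d 0 h']

theorem foldA (l : List (String × String)) (d : PySem.Dict String Int) :
    l.foldl stepA d =
      (l.map (fun p => p.2)).foldl (fun d x => d.insert x (d.getD x 0 + 1)) d := by
  induction l generalizing d with
  | nil => rfl
  | cons p l ih => simp only [List.foldl_cons, List.map_cons]; rw [stepA_eq]; exact ih _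

theorem foldl_mul_succ (l : List Int) (a : Int) :
    l.foldl (fun acc v => acc * (v + 1)) a = a * (l.map (fun v => v + 1)).prod := by
  induction l generalizing a with
  | nil => simp
  | cons x xs ih => simp [ih, mul_assoc]

-- spanRun splits its input into a run of c's and a remainder not starting with c
theorem spanRun_spec (c : String) (l : List String) :
    l = List.replicate (spanRun c l).1 c ++ (spanRun c l).2 ∧
      ∀ x, (spanRun c l).2.head? = some x → x ≠ c := by
  induction l with
  | nil => simp [spanRun]
  | cons y ys ih =>
    by_cases h : y = c
    · subst h
      simp only [spanRun, beq_self_eq_true, if_true]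
      refine ⟨?_, ih.2⟩
      conv_lhs => rw [ih.1]
      simp [List.replicate_succ]
    · have hb : (y == c) = false := by simpa using h
      simp only [spanRun, hb, Bool.false_eq_true, if_false]
      refine ⟨by simp, ?_⟩
      intro x hx
      simp only [List.head?_cons, Option.some.injEq] at hx
      simpa [hx] using h

-- adding a fresh element to a set keeps it prepended through later adds
theorem foldl_add_cons (l : List String) : ∀ (s : List String) (c : String), c ∉ l →
    List.foldl PySem.Set.add (c :: s) l = c :: List.foldl PySem.Set.add s l := by
  induction l with
  | nil => intro s c _; rfl
  | cons y ys ih =>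
    intro s c hc
    have hyc : y ≠ c := by intro h; exact hc (by simp [h])
    have hcys : c ∉ ys := fun h => hc (List.mem_cons_of_mem _ h)
    have hstep : PySem.Set.add (c :: s) y = c :: PySem.Set.add s y := by
      rw [PySem.Set.add_eq_ite, PySem.Set.add_eq_ite]
      by_cases hm : y ∈ s
      · simp [hm, hyc]
      · simp [hm, hyc]
    simp only [List.foldl_cons]
    rw [hstep, ih _ _ hcys]

theorem ofList_cons_not_mem (c : String) (l : List String) (h : c ∉ l) :
    PySem.Set.ofList (c :: l) = c :: PySem.Set.ofList l := by
  rw [PySem.Set.ofList_eq_foldl, PySem.Set.ofList_eq_foldl, List.foldl_cons]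
  have h1 : PySem.Set.add ([] : List String) c = [c] := by
    rw [PySem.Set.add_of_not_mem (by simp)]; rfl
  rw [h1]
  exact foldl_add_cons l [] c h

theorem ofList_cons_cons_self (c : String) (l : List String) :
    PySem.Set.ofList (c :: c :: l) = PySem.Set.ofList (c :: l) := by
  rw [PySem.Set.ofList_eq_foldl, PySem.Set.ofList_eq_foldl, List.foldl_cons, List.foldl_cons,
      List.foldl_cons]
  have h1 : PySem.Set.add ([] : List String) c = [c] := by
    rw [PySem.Set.add_of_not_mem (by simp)]; rfl
  rw [h1, PySem.Set.add_of_mem (by simp)]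

-- the grouped product over a sorted list is the product of (count+1) over its distinct elements
theorem groupsProd_sorted : ∀ (n : Nat) (s : List String), s.length ≤ n → s.Pairwise (· ≤ ·) →
    groupsProd s =
      ((PySem.Set.ofList s).map (fun k => ((List.count k s : Nat) : Int) + 1)).prod := by
  intro n
  induction n with
  | zero =>
    intro s hlen _
    have hs : s = [] := List.eq_nil_of_length_eq_zero (Nat.le_zero.mp hlen)
    subst hs
    simp [groupsProd]
  | succ n ih =>
    intro s hlen hs
    cases s with
    | nil => simp [groupsProd]
    | cons c rest =>
      rcases hspan : spanRun c rest with ⟨r, t⟩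
      have hsp := spanRun_spec c rest
      rw [hspan] at hsp
      obtain ⟨hsplit, hhead⟩ := hsp
      dsimp only at hsplit hhead
      have hrest : rest.Pairwise (· ≤ ·) := (List.pairwise_cons.mp hs).2
      have htsub : t.Sublist rest := by rw [hsplit]; exact List.sublist_append_right _ _
      have htpw : t.Pairwise (· ≤ ·) := hrest.sublist htsub
      have hct : ∀ x ∈ t, x ≠ c := by
        cases t with
        | nil => simp
        | cons h t' =>
          intro x hx
          have hh : h ≠ c := hhead h rfl
          have hhrest : h ∈ rest := by
            rw [hsplit]; exact List.mem_append_right _ (List.mem_cons_self ..)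
          have hch : c ≤ h := (List.pairwise_cons.mp hs).1 h hhrest
          have hclt : c < h := lt_of_le_of_ne hch (Ne.symm hh)
          rcases List.mem_cons.mp hx with rfl | hx'
          · exact hh
          · exact (lt_of_lt_of_le hclt ((List.pairwise_cons.mp htpw).1 x hx')).ne'
      have hcnotmem : c ∉ t := fun hc => (hct c hc) rfl
      have hlt : t.length ≤ n := by
        have hle : t.length ≤ rest.length := by
          have h0 := spanRun_length_le c rest
          rw [hspan] at h0
          simpa using h0
        simp only [List.length_cons] at hlen
        omega
      have iht := ih t hlt htpw
      have hofl : PySem.Set.ofList (c :: rest) = c :: PySem.Set.ofList t := by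
        rw [hsplit]
        have haux : ∀ m : Nat,
            PySem.Set.ofList (c :: (List.replicate m c ++ t)) = PySem.Set.ofList (c :: t) := by
          intro m
          induction m with
          | zero => simp
          | succ m ihm =>
            rw [List.replicate_succ, List.cons_append, ofList_cons_cons_self]
            exact ihm
        rw [haux r, ofList_cons_not_mem c t hcnotmem]
      have hcountc : List.count c (c :: rest) = r + 1 := by
        rw [hsplit]
        simp [List.count_cons_self, List.count_append, List.count_replicate_self,
          List.count_eq_zero.mpr hcnotmem]
      have hcountk : ∀ k ∈ t, List.count k (c :: rest) = List.count k t := by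
        intro k hk
        have hkc : k ≠ c := hct k hk
        rw [hsplit]
        simp [List.count_append, List.count_replicate, Ne.symm hkc]
      rw [groupsProd]
      simp only [hspan]
      rw [hofl]
      simp only [List.map_cons, List.prod_cons]
      rw [hcountc]
      have hmapc : (PySem.Set.ofList t).map
            (fun k => ((List.count k (c :: rest) : Nat) : Int) + 1)
          = (PySem.Set.ofList t).map (fun k => ((List.count k t : Nat) : Int) + 1) := by
        apply List.map_congr_left
        intro k hk
        rw [hcountk k ((PySem.Set.mem_ofList t k).mp hk)]
      rw [hmapc, ← iht]
      push_cast
      ring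

theorem solution_spec' (clothes : List (String × String)) :
    solution clothes = solution_alt clothes := by
  unfold solution solution_alt
  show (List.foldl (fun answer v => answer * (v + 1)) 1
      (List.foldl stepA PySem.Dict.empty clothes).values) - 1 = _
  rw [foldA, PySem.Dict.foldl_insert_getD_add_one_eq_counter]
  have hv : (PySem.Dict.counter (clothes.map (fun p => p.2))).values
      = (PySem.Set.ofList (clothes.map (fun p => p.2))).map
          (fun k => ((List.count k (clothes.map (fun p => p.2)) : Nat) : Int)) := by
    rw [show (PySem.Dict.counter (clothes.map (fun p => p.2))).values
        = ((PySem.Dict.counter (clothes.map (fun p => p.2))).items).map (fun q => q.2) from rfl,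
      PySem.Dict.items_counter, List.map_map]
    rfl
  rw [hv, foldl_mul_succ, one_mul, List.map_map]
  have hpw : (PySem.List.sorted (clothes.map (fun p => p.2)) (fun x => x) false).Pairwise
      (· ≤ ·) := PySem.List.sorted_pairwise (clothes.map (fun p => p.2)) (fun x => x)
  rw [groupsProd_sorted (PySem.List.sorted (clothes.map (fun p => p.2)) (fun x => x) false).length
    _ le_rfl hpw]
  have hperm : (PySem.List.sorted (clothes.map (fun p => p.2)) (fun x => x) false).Perm
      (clothes.map (fun p => p.2)) := PySem.List.sorted_perm _ _ false
  have hsp : (PySem.Set.ofList (PySem.List.sorted (clothes.map (fun p => p.2)) (fun x => x)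
        false)).Perm (PySem.Set.ofList (clothes.map (fun p => p.2))) := by
    rw [List.perm_ext_iff_of_nodup (PySem.Set.nodup_ofList _) (PySem.Set.nodup_ofList _)]
    intro a
    simp only [PySem.Set.mem_ofList]
    exact hperm.mem_iff
  have hmc : (PySem.Set.ofList (PySem.List.sorted (clothes.map (fun p => p.2)) (fun x => x)
        false)).map (fun k => ((List.count k (PySem.List.sorted (clothes.map (fun p => p.2))
          (fun x => x) false) : Nat) : Int) + 1)
      = (PySem.Set.ofList (PySem.List.sorted (clothes.map (fun p => p.2)) (fun x => x)
        false)).map (fun k => ((List.count k (clothes.map (fun p => p.2)) : Nat) : Int) + 1) := by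
    apply List.map_congr_left
    intro k _
    rw [hperm.count_eq]
  rw [hmc, (hsp.map _).prod_eq]
  rfl

-- ===== VERDICT (by name: the statement is the Claim_ definition above) =====
theorem solution_spec : Claim_equal_solution := by
  intro clothes _
  exact solution_spec' clothes
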